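-- pv_equiv track=rewrite | github.com/Kevinwu901113/LapWing | scripts/export_conversations.py | group_into_sessions
-- ===== SOURCE A (Python) =====
-- SESSION_GAP_MINUTES = 30
--
-- def group_into_sessions(events, gap_minutes=SESSION_GAP_MINUTES):
--     if not events:
--         return []
--     sessions = []
--     current = [events[0]]
--     for e in events[1:]:
--         prev_ts = current[-1]["ts"]
--         if (e["ts"] - prev_ts) > gap_minutes * 60:
--             sessions.append(current)
--             current = [e]
--         else:
--             current.append(e)
--     if current:
--         sessions.append(current)
--     return sessions
-- ===== SOURCE B (Python) =====
-- SESSION_GAP_MINUTES = 30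
--
-- def group_into_sessions(events, gap_minutes=SESSION_GAP_MINUTES):
--     # Build sessions back-to-front: walk the events in reverse and either
--     # prepend the event to the upcoming session (gap small) or open a new one.
--     limit = gap_minutes * 60
--     sessions = []
--     for e in reversed(events):
--         if sessions and sessions[0][0]["ts"] - e["ts"] <= limit:
--             sessions[0] = [e] + sessions[0]
--         else:
--             sessions = [[e]] + sessions
--     return sessions
-- ===== Notes on version B (the rewrite author's own statement) =====
-- stated objective: alternative
-- what changed: B builds the session list back-to-front: it walks the events in reverse and either prepends the event to the first (upcoming) session or opens a new one, eliminating A's forward 'sessions'/'current' accumulator pair and final flush.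
import Mathlib
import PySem

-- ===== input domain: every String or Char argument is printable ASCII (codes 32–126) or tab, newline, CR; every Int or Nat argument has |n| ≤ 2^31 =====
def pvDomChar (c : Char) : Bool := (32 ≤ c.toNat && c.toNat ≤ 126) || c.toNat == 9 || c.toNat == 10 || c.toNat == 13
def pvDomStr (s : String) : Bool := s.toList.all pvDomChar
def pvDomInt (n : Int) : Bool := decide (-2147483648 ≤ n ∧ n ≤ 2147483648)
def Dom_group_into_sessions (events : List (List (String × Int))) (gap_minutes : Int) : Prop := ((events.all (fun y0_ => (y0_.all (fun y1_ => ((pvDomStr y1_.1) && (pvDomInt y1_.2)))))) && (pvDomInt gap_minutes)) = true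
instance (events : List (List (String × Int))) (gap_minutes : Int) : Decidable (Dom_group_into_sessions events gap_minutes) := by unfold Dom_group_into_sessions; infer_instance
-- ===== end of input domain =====

-- B builds the sessions back-to-front (reverse walk, prepending into the first
-- session or opening a new one) instead of A's forward accumulator; objective: alternative decomposition.

-- e["ts"] (first matching key; default 0 is never reached inside Pre_)
def pvTs (e : List (String × Int)) : Int := ((e.find? (fun p => p.1 == "ts")).map (·.2)).getD 0
-- xs[-1] / xs[0] on a list of dicts (default [] is never reached: the lists are nonempty where used)
def pvLastD (xs : List (List (String × Int))) : List (String × Int) := (PySem.List.pyGet? xs (-1)).getD []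
def pvHeadD (xs : List (List (String × Int))) : List (String × Int) := (PySem.List.pyGet? xs 0).getD []

-- ===== PORT A =====
def pvStepA (gap_minutes : Int)
    (st : List (List (List (String × Int))) × List (List (String × Int)))
    (e : List (String × Int)) :
    List (List (List (String × Int))) × List (List (String × Int)) :=
  let prev_ts := pvTs (pvLastD st.2)
  if pvTs e - prev_ts > gap_minutes * 60 then (st.1 ++ [st.2], [e]) else (st.1, st.2 ++ [e])

def group_into_sessions (events : List (List (String × Int))) (gap_minutes : Int) : List (List (List (String × Int))) :=
  match events with
  | [] => []
  | e0 :: rest =>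
    let st := rest.foldl (pvStepA gap_minutes) ([], [e0])
    if st.2 = [] then st.1 else st.1 ++ [st.2]

-- ===== PORT B =====
def pvStepB (limit : Int) (sessions : List (List (List (String × Int)))) (e : List (String × Int)) :
    List (List (List (String × Int))) :=
  match sessions with
  | [] => [[e]]
  | g :: gs => if pvTs (pvHeadD g) - pvTs e ≤ limit then (e :: g) :: gs else [e] :: g :: gs

def group_into_sessions_alt (events : List (List (String × Int))) (gap_minutes : Int) : List (List (List (String × Int))) :=
  let limit := gap_minutes * 60
  events.reverse.foldl (pvStepB limit) []

-- ===== PRECONDITION & SPEC =====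
-- Pre_ excludes exactly the inputs where Python A raises KeyError: two or more events and some
-- event dict without a "ts" key (with fewer than two events no "ts" is ever read).
def Pre_group_into_sessions (events : List (List (String × Int))) (gap_minutes : Int) : Prop :=
  2 ≤ events.length → ∀ e ∈ events, (e.find? (fun p => p.1 == "ts")).isSome
instance (events : List (List (String × Int))) (gap_minutes : Int) : Decidable (Pre_group_into_sessions events gap_minutes) := by unfold Pre_group_into_sessions; infer_instance
def pvWitness_group_into_sessions : (List (List (String × Int))) × Int :=
  ([[("ts", 10)], [("ts", 100)], [("ts", 5000)]], 30)

def Spec_group_into_sessions (events : List (List (String × Int))) (gap_minutes : Int) (out : List (List (List (String × Int)))) : Prop := out = group_into_sessions_alt events gap_minutes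
instance (events : List (List (String × Int))) (gap_minutes : Int) (out : List (List (List (String × Int)))) : Decidable (Spec_group_into_sessions events gap_minutes out) := by unfold Spec_group_into_sessions; infer_instance

-- ===== CLAIM (what is proved, stated in full; the proofs are below) =====
def Claim_equal_group_into_sessions : Prop := ∀ (events : List (List (String × Int))) (gap_minutes : Int), Dom_group_into_sessions events gap_minutes → Pre_group_into_sessions events gap_minutes → Spec_group_into_sessions events gap_minutes (group_into_sessions events gap_minutes)

-- ===== LEMMAS AND PROOFS =====

theorem pvLastD_singleton (e : List (String × Int)) : pvLastD [e] = e := by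
  simp [pvLastD, PySem.List.pyGet?_neg_one]

theorem pvLastD_append (cur : List (List (String × Int))) (e : List (String × Int)) :
    pvLastD (cur ++ [e]) = e := by
  simp [pvLastD, PySem.List.pyGet?_neg_one_append_singleton]

theorem pvHeadD_cons (d : List (String × Int)) (ds : List (List (String × Int))) :
    pvHeadD (d :: ds) = d := by
  simp [pvHeadD]

-- unfolding B one event at a time
theorem alt_cons (e : List (String × Int)) (r : List (List (String × Int))) (gap : Int) :
    group_into_sessions_alt (e :: r) gap = pvStepB (gap * 60) (group_into_sessions_alt r gap) e := by
  simp [group_into_sessions_alt, List.reverse_cons, List.foldl_append]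

-- glue a pending forward session 'cur' onto B's grouping of the remaining events
def pvCombine (limit : Int) (cur : List (List (String × Int))) (s : List (List (List (String × Int)))) :
    List (List (List (String × Int))) :=
  match s with
  | [] => [cur]
  | g :: gs => if pvTs (pvHeadD g) - pvTs (pvLastD cur) ≤ limit then (cur ++ g) :: gs else cur :: g :: gs

-- main invariant: A's forward accumulator loop equals prefix ++ combine of B's backward grouping
theorem foldl_eq_combine (gap : Int) (rest : List (List (String × Int))) :
    ∀ (sessions : List (List (List (String × Int)))) (cur : List (List (String × Int))), cur ≠ [] →
    (let st := rest.foldl (pvStepA gap) (sessions, cur)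
     if st.2 = [] then st.1 else st.1 ++ [st.2]) =
      sessions ++ pvCombine (gap * 60) cur (group_into_sessions_alt rest gap) := by
  induction rest with
  | nil =>
    intro sessions cur hcur
    simp [group_into_sessions_alt, pvCombine, hcur]
  | cons e r ih =>
    intro sessions cur hcur
    rw [alt_cons]
    show (let st := r.foldl (pvStepA gap) (pvStepA gap (sessions, cur) e)
          if st.2 = [] then st.1 else st.1 ++ [st.2]) = _
    by_cases hgap : pvTs e - pvTs (pvLastD cur) > gap * 60
    · have hA : pvStepA gap (sessions, cur) e = (sessions ++ [cur], [e]) := by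
        simp [pvStepA, hgap]
      rw [hA, ih (sessions ++ [cur]) [e] (by simp)]
      cases h : group_into_sessions_alt r gap with
      | nil =>
        simp [pvStepB, pvCombine, pvHeadD_cons]; omega
      | cons g gs =>
        by_cases hc : pvTs (pvHeadD g) - pvTs e ≤ gap * 60
        · simp [pvStepB, pvCombine, hc, pvLastD_singleton, pvHeadD_cons, not_le.mpr hgap]
        · simp [pvStepB, pvCombine, hc, pvLastD_singleton, pvHeadD_cons, not_le.mpr hgap]
    · have hA : pvStepA gap (sessions, cur) e = (sessions, cur ++ [e]) := by
        simp [pvStepA, hgap]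
      rw [hA, ih sessions (cur ++ [e]) (by simp)]
      cases h : group_into_sessions_alt r gap with
      | nil =>
        simp [pvStepB, pvCombine, pvHeadD_cons]; omega
      | cons g gs =>
        by_cases hc : pvTs (pvHeadD g) - pvTs e ≤ gap * 60
        · simp [pvStepB, pvCombine, hc, pvLastD_append, pvHeadD_cons, not_lt.mp hgap]
        · simp [pvStepB, pvCombine, hc, pvLastD_append, pvHeadD_cons, not_lt.mp hgap]

theorem combine_singleton (gap : Int) (e : List (String × Int)) (r : List (List (String × Int))) :
    pvCombine (gap * 60) [e] (group_into_sessions_alt r gap) = group_into_sessions_alt (e :: r) gap := by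
  rw [alt_cons]
  cases h : group_into_sessions_alt r gap with
  | nil => simp [pvCombine, pvStepB]
  | cons g gs =>
    by_cases hc : pvTs (pvHeadD g) - pvTs e ≤ gap * 60
    · simp [pvCombine, pvStepB, hc, pvLastD_singleton]
    · simp [pvCombine, pvStepB, hc, pvLastD_singleton]

-- ===== VERDICT (by name: the statement is the Claim_ definition above) =====
theorem group_into_sessions_spec : Claim_equal_group_into_sessions := by
  intro events gap _dom _pre
  unfold Spec_group_into_sessions
  cases events with
  | nil => simp [group_into_sessions, group_into_sessions_alt]
  | cons e0 rest =>
    show (let st := rest.foldl (pvStepA gap) ([], [e0])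
          if st.2 = [] then st.1 else st.1 ++ [st.2]) = _
    rw [foldl_eq_combine gap rest [] [e0] (by simp), List.nil_append,
      combine_singleton]
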